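-- pv_equiv track=rewrite | github.com/jamesHargreaves12/spokenProgramming | tests/bag_of_words_test.py | bag_of_words_test
-- ===== SOURCE A (Python) =====
-- from collections import defaultdict
--
-- def get_words_dict(tokens):
--     words_dict = defaultdict(int)
--     for tok in tokens:
--         words_dict[tok] += 1
--     return words_dict
--
-- def bag_of_words_test(source,target):
--     source_bow = get_words_dict(source)
--     target_bow = get_words_dict(target)
--     keys = set.union(set(source_bow.keys()),set(target_bow.keys()))
--     score = 0
--     for k in keys:
--         diff = abs(source_bow[k]-target_bow[k])
--         score += diff
--     return score
-- ===== SOURCE B (Python) =====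
-- def bag_of_words_test(source, target):
--     # Overlap form: |a-b| = a + b - 2*min(a,b) per token, so the L1 bag distance
--     # is len(source) + len(target) - 2 * (total min-overlap of shared tokens).
--     target_counts = {}
--     for tok in target:
--         target_counts[tok] = target_counts.get(tok, 0) + 1
--     source_counts = {}
--     for tok in source:
--         source_counts[tok] = source_counts.get(tok, 0) + 1
--     overlap = 0
--     for tok, cnt in source_counts.items():
--         overlap += min(cnt, target_counts.get(tok, 0))
--     return len(source) + len(target) - 2 * overlap
-- ===== Notes on version B (the rewrite author's own statement) =====
-- stated objective: alternative
-- what changed: Instead of building the union of key sets and summing an absolute difference per key, B accumulates the min-count overlap over the source's distinct tokens and returns len(source)+len(target)-2*overlap, using |a-b| = a+b-2*min(a,b).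
import Mathlib
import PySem

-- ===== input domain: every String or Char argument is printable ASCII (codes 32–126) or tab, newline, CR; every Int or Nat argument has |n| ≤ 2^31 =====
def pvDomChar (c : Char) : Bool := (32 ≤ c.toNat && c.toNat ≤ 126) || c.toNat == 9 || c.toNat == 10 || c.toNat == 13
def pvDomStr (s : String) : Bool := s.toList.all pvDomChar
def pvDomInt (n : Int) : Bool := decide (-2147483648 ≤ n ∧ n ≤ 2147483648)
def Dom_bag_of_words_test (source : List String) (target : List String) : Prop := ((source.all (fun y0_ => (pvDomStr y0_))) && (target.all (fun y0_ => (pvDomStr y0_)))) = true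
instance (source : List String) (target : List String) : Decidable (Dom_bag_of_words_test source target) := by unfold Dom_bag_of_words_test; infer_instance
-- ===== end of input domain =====

-- B replaces A's union-of-keys / per-key absolute-difference loop by a min-count
-- overlap over the source's distinct tokens and the identity |a-b| = a+b-2*min(a,b).


-- ===== PORT A =====
-- defaultdict(int) counting loop: words_dict[tok] += 1
def get_words_dict (tokens : List String) : PySem.Dict String Int :=
  tokens.foldl (fun d tok => d.modify tok 0 (· + 1)) PySem.Dict.empty

def bag_of_words_test (source : List String) (target : List String) : Int :=
  let source_bow := get_words_dict source
  let target_bow := get_words_dict target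
  let keys := PySem.Set.union (PySem.Set.ofList source_bow.keys) (PySem.Set.ofList target_bow.keys)
  keys.foldl (fun score k => score + |source_bow.getD k 0 - target_bow.getD k 0|) 0

-- ===== PORT B =====
def bag_of_words_test_alt (source : List String) (target : List String) : Int :=
  let target_counts := target.foldl (fun d tok => d.insert tok (d.getD tok 0 + 1)) PySem.Dict.empty
  let source_counts := source.foldl (fun d tok => d.insert tok (d.getD tok 0 + 1)) PySem.Dict.empty
  let overlap := source_counts.items.foldl (fun acc kc => acc + min kc.2 (target_counts.getD kc.1 0)) 0
  (source.length : Int) + (target.length : Int) - 2 * overlap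

-- ===== PRECONDITION & SPEC =====
def Spec_bag_of_words_test (source : List String) (target : List String) (out : Int) : Prop := out = bag_of_words_test_alt source target
instance (source : List String) (target : List String) (out : Int) : Decidable (Spec_bag_of_words_test source target out) := by unfold Spec_bag_of_words_test; infer_instance

-- ===== CLAIM (what is proved, stated in full; the proofs are below) =====
def Claim_equal_bag_of_words_test : Prop := ∀ (source : List String) (target : List String), Dom_bag_of_words_test source target → Spec_bag_of_words_test source target (bag_of_words_test source target)

-- ===== LEMMAS AND PROOFS =====

-- sums over nodup lists with the same members agree
theorem pv_sum_eq_of_mem_iff {α : Type} {L1 L2 : List α} (h1 : L1.Nodup) (h2 : L2.Nodup)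
    (h : ∀ x, x ∈ L1 ↔ x ∈ L2) (f : α → Int) : (L1.map f).sum = (L2.map f).sum :=
  List.Perm.sum_eq (List.Perm.map f ((List.perm_ext_iff_of_nodup h1 h2).2 h))

-- summing the occurrence counts of s over a nodup list covering s gives s.length
theorem pv_sum_count {α : Type} [BEq α] [LawfulBEq α] (L : List α) (hL : L.Nodup) :
    ∀ (s : List α), (∀ x ∈ s, x ∈ L) →
      (L.map (fun k => (s.count k : Int))).sum = s.length := by
  intro s
  induction s with
  | nil => intro _; simp
  | cons x s ih =>
    intro hs
    have hx : x ∈ L := hs x (List.mem_cons_self)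
    have hrest : ∀ y ∈ s, y ∈ L := fun y hy => hs y (List.mem_cons_of_mem x hy)
    have hsplit : (L.map (fun k => ((x :: s).count k : Int))).sum
        = (L.map (fun k => (s.count k : Int) + (if k == x then 1 else 0))).sum := by
      apply congrArg
      apply List.map_congr_left
      intro k _
      by_cases hk : k = x
      · subst hk; simp
      · simp [hk, Ne.symm hk]
    rw [hsplit, PySem.List.sum_map_add_int, ih hrest,
        PySem.List.sum_map_ite_one_zero (fun k => k == x) L]
    have : L.countP (fun k => k == x) = L.count x := rfl
    rw [this, List.count_eq_one_of_mem hL hx]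
    simp only [List.length_cons]
    push_cast
    omega

-- dropping the elements where the summand vanishes
theorem pv_sum_filter {α : Type} (L : List α) (p : α → Bool) (g : α → Int)
    (h : ∀ k ∈ L, p k = false → g k = 0) :
    (L.map g).sum = ((L.filter p).map g).sum := by
  induction L with
  | nil => simp
  | cons x L ih =>
    have hx := h x List.mem_cons_self
    have hrest : ∀ k ∈ L, p k = false → g k = 0 := fun k hk => h k (List.mem_cons_of_mem x hk)
    by_cases hp : p x
    · simp [hp, ih hrest]
    · simp only [Bool.not_eq_true] at hp
      simp [hp, ih hrest, hx hp]

-- |a - b| = a + b - 2 * min a b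
theorem pv_abs_min (a b : Int) : |a - b| = a + b - 2 * min a b := by
  rcases le_total a b with h | h
  · rw [abs_of_nonpos (by omega), min_eq_left h]; ring
  · rw [abs_of_nonneg (by omega), min_eq_right h]; ring

-- ===== VERDICT (by name: the statement is the Claim_ definition above) =====
theorem bag_of_words_test_spec : Claim_equal_bag_of_words_test := by
  intro source target _
  unfold Spec_bag_of_words_test bag_of_words_test bag_of_words_test_alt get_words_dict
  rw [← PySem.Dict.counter_eq_foldl source, ← PySem.Dict.counter_eq_foldl target,
      PySem.Dict.foldl_insert_getD_add_one_eq_counter source,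
      PySem.Dict.foldl_insert_getD_add_one_eq_counter target]
  simp only [PySem.Dict.keys_counter, PySem.Dict.getD_counter, PySem.Dict.items_counter]
  rw [PySem.List.foldl_add _ (fun k => |((List.count k source : Int)) - (List.count k target : Int)|),
      PySem.List.foldl_add _ (fun kc : String × Int => min kc.2 ((List.count kc.1 target : Int)))]
  simp only [List.map_map, Function.comp_def, zero_add]
  set K := PySem.Set.union (PySem.Set.ofList (PySem.Set.ofList source)) (PySem.Set.ofList (PySem.Set.ofList target)) with hKdef
  have hK : K.Nodup := PySem.Set.nodup_union _ _ (PySem.Set.nodup_ofList _)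
  have hKmem : ∀ x, x ∈ K ↔ (x ∈ source ∨ x ∈ target) := by
    intro x
    rw [hKdef, PySem.Set.mem_union, PySem.Set.mem_ofList, PySem.Set.mem_ofList,
        PySem.Set.mem_ofList, PySem.Set.mem_ofList]
  have habs : (K.map (fun k => |((List.count k source : Int)) - (List.count k target : Int)|)).sum
      = (K.map (fun k => (List.count k source : Int))).sum
        + (K.map (fun k => (List.count k target : Int))).sum
        + (-2) * (K.map (fun k => min ((List.count k source : Int)) ((List.count k target : Int)))).sum := by
    rw [← List.sum_map_mul_left, ← PySem.List.sum_map_add_int, ← PySem.List.sum_map_add_int]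
    apply congrArg
    apply List.map_congr_left
    intro k _
    rw [pv_abs_min]
    ring
  have hmin : (K.map (fun k => min ((List.count k source : Int)) ((List.count k target : Int)))).sum
      = ((PySem.Set.ofList source).map (fun k => min ((List.count k source : Int)) ((List.count k target : Int)))).sum := by
    rw [pv_sum_filter K (fun k => source.contains k) _ ?_]
    · apply pv_sum_eq_of_mem_iff (hK.filter _) (PySem.Set.nodup_ofList _)
      intro x
      simp [List.mem_filter, hKmem x, PySem.Set.mem_ofList]
      tauto
    · intro k _ hns
      have h0 : List.count k source = 0 := by
        rw [List.count_eq_zero]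
        simpa using hns
      rw [h0]
      simp only [Nat.cast_zero]
      exact min_eq_left (by positivity)
  rw [habs, hmin,
      pv_sum_count K hK source (fun x hx => (hKmem x).2 (Or.inl hx)),
      pv_sum_count K hK target (fun x hx => (hKmem x).2 (Or.inr hx))]
  ring
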